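-- pv_equiv track=rewrite | github.com/toilaluan/beacon-hf | seed.py | insert_checkpoints
-- ===== SOURCE A (Python) =====
-- from typing import Callable, Iterable, Iterator, List, Sequence, Tuple, Dict, Optional
--
-- def insert_checkpoints(token_ids: Sequence[int], stride: int, ckpt_id: int) -> List[int]:
--     """
--     Insert checkpoint tokens every `stride` tokens: [.. stride .. CKPT .. stride .. CKPT ..]
--     """
--     if stride <= 0:
--         return list(token_ids)
--
--     with_ckpts: List[int] = []
--     for start in range(0, len(token_ids), stride):
--         end = min(start + stride, len(token_ids))
--         with_ckpts.extend(token_ids[start:end])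
--         if end < len(token_ids):
--             with_ckpts.append(ckpt_id)
--     return with_ckpts
-- ===== SOURCE B (Python) =====
-- def insert_checkpoints(token_ids, stride, ckpt_id):
--     if stride <= 0:
--         return list(token_ids)
--     n = len(token_ids)
--     out = []
--     for i, t in enumerate(token_ids):
--         out.append(t)
--         if (i + 1) % stride == 0 and i + 1 < n:
--             out.append(ckpt_id)
--     return out
-- ===== Notes on version B (the rewrite author's own statement) =====
-- stated objective: alternative
-- what changed: Replaces the per-chunk loop over range(0, n, stride) with its slice extraction by a single per-token enumerate loop that emits the checkpoint via a modulo test (i+1) % stride == 0 with a trailing-position guard.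
import Mathlib
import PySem

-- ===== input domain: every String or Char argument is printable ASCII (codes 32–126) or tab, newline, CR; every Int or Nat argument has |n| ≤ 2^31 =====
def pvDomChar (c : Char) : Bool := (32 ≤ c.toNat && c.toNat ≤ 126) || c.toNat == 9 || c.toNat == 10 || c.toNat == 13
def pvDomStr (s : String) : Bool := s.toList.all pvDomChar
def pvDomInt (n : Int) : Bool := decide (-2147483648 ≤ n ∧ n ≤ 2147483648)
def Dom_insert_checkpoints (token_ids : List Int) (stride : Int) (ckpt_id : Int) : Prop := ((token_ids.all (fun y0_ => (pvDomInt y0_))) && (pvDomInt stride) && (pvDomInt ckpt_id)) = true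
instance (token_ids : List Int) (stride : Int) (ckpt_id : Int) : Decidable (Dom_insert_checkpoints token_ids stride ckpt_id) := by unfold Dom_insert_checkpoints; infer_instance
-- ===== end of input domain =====

-- B replaces A's per-chunk slicing loop over range(0, n, stride) by a single per-token
-- enumerate loop emitting checkpoints via a modulo test; same cost, different decomposition.


-- ===== PORT A =====
-- for start in range(0, len(token_ids), stride): extend with token_ids[start:end]; append ckpt if end < len
def insert_checkpoints (token_ids : List Int) (stride : Int) (ckpt_id : Int) : List Int :=
  if stride ≤ 0 then token_ids
  else
    (PySem.List.pyRange 0 (token_ids.length : Int) stride).foldl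
      (fun with_ckpts start =>
        let e : Int := min (start + stride) (token_ids.length : Int)
        let with_ckpts := with_ckpts ++ PySem.List.slice token_ids (some start) (some e)
        if e < (token_ids.length : Int) then with_ckpts ++ [ckpt_id] else with_ckpts)
      []

-- ===== PORT B =====
-- for i, t in enumerate(token_ids): append t; append ckpt when (i+1) % stride == 0 and i+1 < n
def insert_checkpoints_alt (token_ids : List Int) (stride : Int) (ckpt_id : Int) : List Int :=
  if stride ≤ 0 then token_ids
  else
    let n : Int := token_ids.length
    (PySem.List.enumerate token_ids 0).foldl
      (fun out p =>
        let out := out ++ [p.2]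
        if PySem.Int.mod (p.1 + 1) stride = 0 ∧ p.1 + 1 < n then out ++ [ckpt_id] else out)
      []

-- ===== PRECONDITION & SPEC =====
def Spec_insert_checkpoints (token_ids : List Int) (stride : Int) (ckpt_id : Int) (out : List Int) : Prop := out = insert_checkpoints_alt token_ids stride ckpt_id
instance (token_ids : List Int) (stride : Int) (ckpt_id : Int) (out : List Int) : Decidable (Spec_insert_checkpoints token_ids stride ckpt_id out) := by unfold Spec_insert_checkpoints; infer_instance

-- ===== CLAIM (what is proved, stated in full; the proofs are below) =====
def Claim_equal_insert_checkpoints : Prop := ∀ (token_ids : List Int) (stride : Int) (ckpt_id : Int), Dom_insert_checkpoints token_ids stride ckpt_id → Spec_insert_checkpoints token_ids stride ckpt_id (insert_checkpoints token_ids stride ckpt_id)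

-- ===== LEMMAS AND PROOFS =====

-- Common reference form: chunk recursion "take stride, emit ckpt, recurse".
def pvChunks (s : Nat) (c : Int) (xs : List Int) : List Int :=
  if _h : 0 < s ∧ s < xs.length then xs.take s ++ c :: pvChunks s c (xs.drop s) else xs
termination_by xs.length
decreasing_by simp; omega

-- pyRange cons for a positive step
theorem pvPyRange_pos_cons (a b s : Int) (hs : 0 < s) (hab : a < b) :
    PySem.List.pyRange a b s = a :: PySem.List.pyRange (a + s) b s := by
  rw [PySem.List.pyRange_of_pos a b hs, PySem.List.pyRange_of_pos (a + s) b hs]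
  have hcount : (if a < b then ((b - a + s - 1) / s).toNat else 0)
      = (if a + s < b then ((b - (a + s) + s - 1) / s).toNat else 0) + 1 := by
    rw [if_pos hab]
    by_cases h2 : a + s < b
    · rw [if_pos h2]
      have h1 : b - a + s - 1 = (b - (a + s) + s - 1) + 1 * s := by ring
      rw [h1, Int.add_mul_ediv_right _ _ (by omega : s ≠ 0)]
      have : 0 ≤ (b - (a + s) + s - 1) / s := Int.ediv_nonneg (by omega) (by omega)
      omega
    · rw [if_neg h2]
      have hq1 : 1 ≤ (b - a + s - 1) / s := (Int.le_ediv_iff_mul_le hs).2 (by omega)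
      have hq2 : (b - a + s - 1) / s < 2 := (Int.ediv_lt_iff_lt_mul hs).2 (by omega)
      omega
  rw [hcount, List.range_succ_eq_map, List.map_cons, List.map_map]
  simp only [Nat.cast_zero, mul_zero, add_zero]
  congr 1
  apply List.map_congr_left
  intro k _
  simp only [Function.comp_apply, Nat.succ_eq_add_one]
  push_cast
  ring

theorem pvPyRange_pos_nil (a b s : Int) (hs : 0 < s) (hab : b ≤ a) :
    PySem.List.pyRange a b s = [] := by
  rw [PySem.List.pyRange_of_pos a b hs, if_neg (by omega)]
  simp

-- A's loop, started at index a, produces the chunk recursion on the suffix.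
theorem pvA_loop (toks : List Int) (s : Int) (hs : 0 < s) (c : Int) :
    ∀ (m : Nat) (a : Nat), toks.length - a ≤ m →
    (PySem.List.pyRange (a : Int) (toks.length : Int) s).flatMap
      (fun start =>
        PySem.List.slice toks (some start) (some (min (start + s) (toks.length : Int))) ++
          (if min (start + s) (toks.length : Int) < (toks.length : Int) then [c] else []))
    = pvChunks s.toNat c (toks.drop a) := by
  intro m
  induction m with
  | zero =>
    intro a ha
    have hge : (toks.length : Int) ≤ (a : Int) := by exact_mod_cast Nat.le_of_sub_eq_zero (by omega)
    rw [pvPyRange_pos_nil _ _ _ hs hge, List.drop_eq_nil_of_le (by exact_mod_cast hge)]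
    rw [pvChunks]
    simp
  | succ m ih =>
    intro a ha
    by_cases hlt : a < toks.length
    · have hltI : (a : Int) < (toks.length : Int) := by exact_mod_cast hlt
      rw [pvPyRange_pos_cons _ _ _ hs hltI, List.flatMap_cons]
      have hslice : PySem.List.slice toks (some (a : Int))
          (some (min ((a : Int) + s) (toks.length : Int)))
          = ((toks.drop a).take ((min ((a : Int) + s) (toks.length : Int)).toNat - a)) := by
        rw [PySem.List.slice_of_nonneg toks (by omega) (by omega) (by omega) (by omega),
          Int.toNat_natCast]
      by_cases hmore : (a : Int) + s < (toks.length : Int)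
      · have hmin : min ((a : Int) + s) (toks.length : Int) = (a : Int) + s := by omega
        rw [hslice, hmin, if_pos (by omega)]
        have hcast : ((a + s.toNat : Nat) : Int) = (a : Int) + s := by push_cast; omega
        have hrec := ih (a + s.toNat) (by omega)
        rw [hcast] at hrec
        rw [hrec]
        conv_rhs => rw [pvChunks]
        rw [dif_pos (show 0 < s.toNat ∧ s.toNat < (toks.drop a).length by
          rw [List.length_drop]; omega)]
        rw [List.drop_drop]
        have htoNat : ((a : Int) + s).toNat - a = s.toNat := by omega
        rw [htoNat]
        have hcomm : a + s.toNat = s.toNat + a := by omega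
        rw [hcomm]
        simp
      · have hmin : min ((a : Int) + s) (toks.length : Int) = (toks.length : Int) := by omega
        rw [hslice, hmin, if_neg (by omega)]
        rw [pvPyRange_pos_nil _ _ _ hs (by omega)]
        conv_rhs => rw [pvChunks]
        rw [dif_neg (show ¬ (0 < s.toNat ∧ s.toNat < (toks.drop a).length) by
          rw [List.length_drop]; omega)]
        rw [List.take_of_length_le (by rw [List.length_drop]; omega)]
        simp
    · rw [pvPyRange_pos_nil _ _ _ hs (by exact_mod_cast (by omega : toks.length ≤ a)),
        List.drop_eq_nil_of_le (by omega), pvChunks]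
      simp

-- mod helpers
theorem pvMod_succ (s a r : Int) (hs : 0 < s) (h : PySem.Int.mod a s = r) (hr : 0 ≤ r)
    (hlt : r + 1 < s) : PySem.Int.mod (a + 1) s = r + 1 := by
  rw [PySem.Int.mod_eq_emod_of_pos hs] at h
  rw [PySem.Int.mod_eq_emod_of_pos hs]
  have h1 : (1 : Int) % s = 1 := Int.emod_eq_of_lt (by omega) (by omega)
  rw [Int.add_emod, h, h1, Int.emod_eq_of_lt (by omega) (by omega)]

theorem pvMod_roll (s a : Int) (hs : 0 < s) (h : PySem.Int.mod a s = s - 1) :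
    PySem.Int.mod (a + 1) s = 0 := by
  rw [PySem.Int.mod_eq_emod_of_pos hs] at h
  rw [PySem.Int.mod_eq_emod_of_pos hs]
  have heq : a + 1 = (a - (s - 1)) + 1 * s := by ring
  rw [heq, Int.add_mul_emod_self_right, Int.sub_emod, h]
  have hsm : (s - 1) % s = s - 1 := Int.emod_eq_of_lt (by omega) (by omega)
  rw [hsm, sub_self, Int.zero_emod]

-- B's flatMap over one (partial) chunk, entered at remainder r
theorem pvB_block (s n c : Int) (hs : 0 < s) :
    ∀ (zs : List Int) (a r : Int), PySem.Int.mod a s = r → r + (zs.length : Int) ≤ s →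
    (PySem.List.enumerate zs a).flatMap
      (fun p => p.2 :: (if PySem.Int.mod (p.1 + 1) s = 0 ∧ p.1 + 1 < n then [c] else []))
    = zs ++ (if r + (zs.length : Int) = s ∧ a + (zs.length : Int) < n then [c] else []) := by
  intro zs
  induction zs with
  | nil =>
    intro a r hmod hle
    have hrlt : r < s := by
      rw [PySem.Int.mod_eq_emod_of_pos hs] at hmod
      have := Int.emod_lt_of_pos a hs; omega
    simp only [PySem.List.enumerate_nil, List.flatMap_nil, List.length_nil, Nat.cast_zero,
      add_zero, List.nil_append]
    rw [if_neg (by omega)]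
  | cons z zs ih =>
    intro a r hmod hle
    have hr0 : 0 ≤ r := by
      rw [PySem.Int.mod_eq_emod_of_pos hs] at hmod
      have := Int.emod_nonneg a (by omega : s ≠ 0); omega
    rw [PySem.List.enumerate_cons, List.flatMap_cons]
    have hlen : r + ((zs.length : Int) + 1) ≤ s := by
      simp only [List.length_cons] at hle; push_cast at hle; omega
    by_cases hroll : r + 1 = s
    · have hzs : zs = [] := by
        have : (zs.length : Int) = 0 := by omega
        simpa using this
      subst hzs
      have hra : PySem.Int.mod a s = s - 1 := by omega
      rw [pvMod_roll s a hs hra]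
      simp only [PySem.List.enumerate_nil, List.flatMap_nil, List.append_nil, List.length_cons,
        List.length_nil, Nat.cast_one, zero_add]
      by_cases hn : a + 1 < n
      · rw [if_pos ⟨by simp, hn⟩, if_pos ⟨by omega, hn⟩]
        simp
      · rw [if_neg (by tauto), if_neg (by tauto)]
        simp
    · have hmod' : PySem.Int.mod (a + 1) s = r + 1 := pvMod_succ s a r hs hmod hr0 (by omega)
      rw [ih (a + 1) (r + 1) hmod' (by omega)]
      rw [if_neg (by rw [hmod']; omega)]
      simp only [List.cons_append, List.length_cons, List.nil_append]
      have h1 : r + ((zs.length : Int) + 1) = (r + 1) + (zs.length : Int) := by ring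
      have h2 : a + ((zs.length : Int) + 1) = (a + 1) + (zs.length : Int) := by ring
      push_cast
      rw [h1, h2]

-- B's loop equals the chunk recursion (a a multiple of s, n the true end)
theorem pvB_gen (s n c : Int) (hs : 0 < s) :
    ∀ (m : Nat) (xs : List Int) (a : Int), xs.length ≤ m → 0 ≤ a → s ∣ a →
    n = a + (xs.length : Int) →
    (PySem.List.enumerate xs a).flatMap
      (fun p => p.2 :: (if PySem.Int.mod (p.1 + 1) s = 0 ∧ p.1 + 1 < n then [c] else []))
    = pvChunks s.toNat c xs := by
  intro m
  induction m with
  | zero =>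
    intro xs a hm _ _ _
    have : xs = [] := by
      cases xs with
      | nil => rfl
      | cons x xs => simp at hm
    subst this
    rw [pvChunks]
    simp
  | succ m ih =>
    intro xs a hm ha hdvd hn
    have hmod0 : PySem.Int.mod a s = 0 := by
      rw [PySem.Int.mod_eq_emod_of_pos hs]
      exact Int.emod_eq_zero_of_dvd hdvd
    by_cases hsmall : (xs.length : Int) ≤ s
    · rw [pvB_block s n c hs xs a 0 hmod0 (by omega)]
      rw [if_neg (by omega)]
      rw [pvChunks, dif_neg (by simp; omega)]
      simp
    · -- split off one full chunk of s.toNat tokens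
      have hsplit : xs = xs.take s.toNat ++ xs.drop s.toNat := (List.take_append_drop _ _).symm
      have hlen_take : (xs.take s.toNat).length = s.toNat := by
        rw [List.length_take]; omega
      conv_lhs => rw [hsplit]
      rw [PySem.List.enumerate_append, List.flatMap_append, hlen_take]
      rw [pvB_block s n c hs (xs.take s.toNat) a 0 hmod0 (by rw [hlen_take]; omega)]
      rw [if_pos ⟨by rw [hlen_take]; omega, by rw [hlen_take]; omega⟩]
      have hrec := ih (xs.drop s.toNat) (a + (s.toNat : Int)) (by simp; omega) (by omega)
        (by
          have hts : ((s.toNat : Nat) : Int) = s := by omega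
          exact dvd_add hdvd (hts ▸ dvd_refl s))
        (by rw [hn]; simp only [List.length_drop]; omega)
      rw [hrec]
      conv_rhs => rw [pvChunks]
      rw [dif_pos (show 0 < s.toNat ∧ s.toNat < xs.length by omega)]
      simp

-- ===== VERDICT (by name: the statement is the Claim_ definition above) =====
theorem insert_checkpoints_spec : Claim_equal_insert_checkpoints := by
  intro token_ids stride ckpt_id _
  unfold Spec_insert_checkpoints insert_checkpoints insert_checkpoints_alt
  by_cases hle : stride ≤ 0
  · rw [if_pos hle, if_pos hle]
  · rw [if_neg hle, if_neg hle]
    dsimp only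
    have hs : 0 < stride := by omega
    -- turn both foldls into flatMaps
    have hA : (fun (with_ckpts : List Int) (start : Int) =>
        let e : Int := min (start + stride) (token_ids.length : Int)
        let with_ckpts := with_ckpts ++ PySem.List.slice token_ids (some start) (some e)
        if e < (token_ids.length : Int) then with_ckpts ++ [ckpt_id] else with_ckpts)
      = (fun (acc : List Int) (start : Int) => acc ++
          (PySem.List.slice token_ids (some start)
              (some (min (start + stride) (token_ids.length : Int))) ++
            (if min (start + stride) (token_ids.length : Int) < (token_ids.length : Int)
              then [ckpt_id] else []))) := by
      funext acc start
      simp only []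
      split_ifs <;> simp
    have hB : (fun (out : List Int) (p : Int × Int) =>
        let out := out ++ [p.2]
        if PySem.Int.mod (p.1 + 1) stride = 0 ∧ p.1 + 1 < (token_ids.length : Int)
          then out ++ [ckpt_id] else out)
      = (fun (acc : List Int) (p : Int × Int) => acc ++
          (p.2 :: (if PySem.Int.mod (p.1 + 1) stride = 0 ∧ p.1 + 1 < (token_ids.length : Int)
            then [ckpt_id] else []))) := by
      funext acc p
      simp only []
      split_ifs <;> simp
    rw [hA, hB, PySem.List.foldl_append_eq_flatMap, PySem.List.foldl_append_eq_flatMap]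
    simp only [List.nil_append]
    have hAeq := pvA_loop token_ids stride hs ckpt_id token_ids.length 0 (by omega)
    have hBeq := pvB_gen stride (token_ids.length : Int) ckpt_id hs token_ids.length token_ids 0
      (le_refl _) (le_refl _) (dvd_zero _) (by simp)
    simp only [Nat.cast_zero, List.drop_zero] at hAeq
    rw [hAeq, ← hBeq]
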